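-- pv_equiv track=rewrite | github.com/sajedjalil/Data-Science-Pipeline-Detector | dataset/traveling-santa-2018-prime-paths/Kozyr/min-circle-naive-approach-with-permutations.py | left_path
-- ===== SOURCE A (Python) =====
-- def left_path(path, idx):
--     K = len(path)
--     w = [path[idx]]
--     i = idx - 1
--     if i < 0: i = K - 1
--     while i != idx:
--         w.append(path[i])
--         i -= 1
--         if i < 0: i = K - 1
--     return w
-- ===== SOURCE B (Python) =====
-- def left_path(path, idx):
--     return [path[idx]] + list(reversed(path[:idx])) + list(reversed(path[idx+1:]))
-- ===== Notes on version B (the rewrite author's own statement) =====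
-- stated objective: simpler
-- what changed: Replaces the explicit backwards circular index loop with a closed form: the element at idx followed by the reversed prefix and the reversed suffix, with no wraparound arithmetic.
import Mathlib
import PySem

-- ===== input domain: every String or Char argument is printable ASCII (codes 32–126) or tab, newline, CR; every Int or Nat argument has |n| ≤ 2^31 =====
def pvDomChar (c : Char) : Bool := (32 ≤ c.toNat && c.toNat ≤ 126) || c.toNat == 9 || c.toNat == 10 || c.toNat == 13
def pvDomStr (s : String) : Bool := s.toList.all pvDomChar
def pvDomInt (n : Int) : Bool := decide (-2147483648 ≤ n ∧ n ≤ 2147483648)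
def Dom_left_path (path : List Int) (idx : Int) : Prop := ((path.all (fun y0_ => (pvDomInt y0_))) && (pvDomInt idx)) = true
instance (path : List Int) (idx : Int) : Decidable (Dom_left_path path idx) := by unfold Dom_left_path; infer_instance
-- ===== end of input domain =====

-- B replaces A's backwards circular index loop by a closed form (reversed prefix ++ reversed suffix); objective: simpler.

-- ===== PORT A =====
-- the while loop, with fuel path.length as a totality guard (under Pre_ the loop
-- makes at most path.length - 1 iterations, so the guard is never the reason it stops)
def leftLoopA (path : List Int) (idx : Int) : Nat → Int → List Int → List Int
  | 0, _, w => w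
  | fuel + 1, i, w =>
    if i = idx then w
    else
      match PySem.List.pyGet? path i with
      | none => w      -- IndexError (unreachable under Pre_)
      | some v =>
        let i1 := i - 1
        let i2 := if i1 < 0 then (path.length : Int) - 1 else i1
        leftLoopA path idx fuel i2 (w ++ [v])

def left_path (path : List Int) (idx : Int) : List Int :=
  let K : Int := path.length
  match PySem.List.pyGet? path idx with
  | none => []       -- IndexError (unreachable under Pre_)
  | some v =>
    let i := idx - 1
    let i2 := if i < 0 then K - 1 else i
    leftLoopA path idx path.length i2 [v]

-- ===== PORT B =====
def left_path_alt (path : List Int) (idx : Int) : List Int :=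
  match PySem.List.pyGet? path idx with
  | none => []       -- IndexError (unreachable under Pre_)
  | some v =>
    [v] ++ (PySem.List.slice path none (some idx)).reverse
        ++ (PySem.List.slice path (some (idx + 1)) none).reverse

-- ===== PRECONDITION & SPEC =====
-- Pre_ excludes out-of-range idx (A raises IndexError for idx ≥ len or idx < -len)
-- and negative in-range idx (A's loop never reaches idx again and diverges).
def Pre_left_path (path : List Int) (idx : Int) : Prop := 0 ≤ idx ∧ idx < path.length
instance (path : List Int) (idx : Int) : Decidable (Pre_left_path path idx) := by unfold Pre_left_path; infer_instance
def pvWitness_left_path : List Int × Int := ([10, 20, 30, 40], 1)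

def Spec_left_path (path : List Int) (idx : Int) (out : List Int) : Prop := out = left_path_alt path idx
instance (path : List Int) (idx : Int) (out : List Int) : Decidable (Spec_left_path path idx out) := by unfold Spec_left_path; infer_instance

-- ===== CLAIM (what is proved, stated in full; the proofs are below) =====
def Claim_equal_left_path : Prop := ∀ (path : List Int) (idx : Int), Dom_left_path path idx → Pre_left_path path idx → Spec_left_path path idx (left_path path idx)

-- ===== LEMMAS AND PROOFS =====

-- descending phase without wraparound: from index n+m down to (but excluding) n
theorem leftLoopA_desc (path : List Int) (n : Nat) :
    ∀ (m fuel : Nat) (w : List Int), n + m < path.length → m ≤ fuel →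
      leftLoopA path (n : Int) fuel (((n + m : Nat) : Int)) w
        = w ++ (((path.drop (n + 1)).take m).reverse) := by
  intro m
  induction m with
  | zero =>
    intro fuel w _ _
    cases fuel <;> simp [leftLoopA]
  | succ m ih =>
    intro fuel w hlt hfuel
    cases fuel with
    | zero => omega
    | succ fuel =>
      have hne : (((n + (m + 1) : Nat) : Int)) ≠ (n : Int) := by push_cast; omega
      have hv : n + (m + 1) < path.length := hlt
      have hget : PySem.List.pyGet? path (((n + (m + 1) : Nat) : Int)) = some (path[n + m + 1]'(by omega)) := by
        rw [PySem.List.pyGet?_natCast]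
        simp [List.getElem?_eq_getElem (show n + (m + 1) < path.length by omega)]
        rfl
      have hnneg : ¬ ((((n + (m + 1) : Nat) : Int)) - 1 < 0) := by push_cast; omega
      have hstep : (((n + (m + 1) : Nat) : Int)) - 1 = (((n + m : Nat) : Int)) := by push_cast; ring
      simp only [leftLoopA, if_neg hne, hget, hstep]
      rw [if_neg (show ¬ (((n + m : Nat) : Int) < 0) by push_cast; omega)]
      rw [ih fuel (w ++ [path[n + m + 1]'(by omega)]) (by omega) (by omega)]
      have htake : (path.drop (n + 1)).take (m + 1)
          = (path.drop (n + 1)).take m ++ [path[n + m + 1]'(by omega)] := by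
        have hm : m < (path.drop (n + 1)).length := by simp; omega
        rw [List.take_add_one, List.getElem?_eq_getElem hm]
        simp [List.getElem_drop]
        congr 1
        omega
      rw [htake]
      simp

-- descending phase with wraparound: from index j < n down to 0, wrap to K-1, then desc
theorem leftLoopA_desc0 (path : List Int) (n : Nat) (hn : n < path.length) :
    ∀ (j fuel : Nat) (w : List Int), j < n → j + (path.length - n) ≤ fuel →
      leftLoopA path (n : Int) fuel ((j : Nat) : Int) w
        = w ++ (path.take (j + 1)).reverse ++ (path.drop (n + 1)).reverse := by
  intro j
  induction j with
  | zero =>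
    intro fuel w hj hfuel
    cases fuel with
    | zero => omega
    | succ fuel =>
      have hne : ((0 : Nat) : Int) ≠ (n : Int) := by omega
      have hget : PySem.List.pyGet? path ((0 : Nat) : Int) = some (path[0]'(by omega)) := by
        rw [PySem.List.pyGet?_natCast]
        simp [List.getElem?_eq_getElem (show 0 < path.length by omega)]
      have hneg : ((0 : Nat) : Int) - 1 < 0 := by norm_num
      simp only [leftLoopA, if_neg hne, hget, hneg, if_true]
      have hK : ((path.length : Int) - 1) = (((n + (path.length - 1 - n) : Nat)) : Int) := by
        push_cast; omega
      rw [hK, leftLoopA_desc path n (path.length - 1 - n) fuel _ (by omega) (by omega)]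
      have hall : (path.drop (n + 1)).take (path.length - 1 - n) = path.drop (n + 1) := by
        apply List.take_of_length_le; simp; omega
      rw [hall]
      have h1 : path.take 1 = [path[0]'(by omega)] := by
        rw [List.take_one]
        cases path with
        | nil => simp at hn
        | cons a t => simp
      simp [h1]
  | succ j ih =>
    intro fuel w hj hfuel
    cases fuel with
    | zero => omega
    | succ fuel =>
      have hne : ((j + 1 : Nat) : Int) ≠ (n : Int) := by push_cast; omega
      have hget : PySem.List.pyGet? path ((j + 1 : Nat) : Int) = some (path[j + 1]'(by omega)) := by
        rw [PySem.List.pyGet?_natCast]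
        simp [List.getElem?_eq_getElem (show j + 1 < path.length by omega)]
      have hnneg : ¬ (((j + 1 : Nat) : Int) - 1 < 0) := by push_cast; omega
      have hstep : ((j + 1 : Nat) : Int) - 1 = ((j : Nat) : Int) := by push_cast; ring
      simp only [leftLoopA, if_neg hne, hget, hstep]
      rw [if_neg (show ¬ (((j : Nat) : Int) < 0) by omega)]
      rw [ih fuel _ (by omega) (by omega)]
      have htake : path.take (j + 1 + 1) = path.take (j + 1) ++ [path[j + 1]'(by omega)] := by
        rw [List.take_add_one, List.getElem?_eq_getElem (show j + 1 < path.length by omega)]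
        simp
      rw [htake, List.reverse_append]
      simp

theorem left_path_eq_closed (path : List Int) (n : Nat) (hn : n < path.length) :
    left_path path (n : Int) = (path.take (n + 1)).reverse ++ (path.drop (n + 1)).reverse := by
  have hget : PySem.List.pyGet? path ((n : Nat) : Int) = some (path[n]'hn) := by
    rw [PySem.List.pyGet?_natCast]
    simp [List.getElem?_eq_getElem hn]
  unfold left_path
  simp only [hget]
  by_cases h0 : n = 0
  · subst h0
    have hneg : ((0 : Nat) : Int) - 1 < 0 := by norm_num
    simp only [hneg, if_true]
    have hK : ((path.length : Int) - 1) = (((0 + (path.length - 1) : Nat)) : Int) := by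
      push_cast; omega
    rw [hK, leftLoopA_desc path 0 (path.length - 1) path.length _ (by omega) (by omega)]
    have hall : (path.drop 1).take (path.length - 1) = path.drop 1 := by
      apply List.take_of_length_le; simp
    rw [hall]
    have h1 : path.take 1 = [path[0]'hn] := by
      rw [List.take_one]
      cases path with
      | nil => simp at hn
      | cons a t => simp
    simp [h1]
  · have hnneg : ¬ (((n : Nat) : Int) - 1 < 0) := by omega
    have hstep : ((n : Nat) : Int) - 1 = ((n - 1 : Nat) : Int) := by omega
    rw [if_neg hnneg, hstep]
    rw [leftLoopA_desc0 path n hn (n - 1) path.length _ (by omega) (by omega)]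
    have he : n - 1 + 1 = n := by omega
    have htake : path.take (n + 1) = path.take n ++ [path[n]'hn] := by
      rw [List.take_add_one, List.getElem?_eq_getElem hn]
      simp
    rw [he, htake, List.reverse_append]
    simp

theorem left_path_alt_eq_closed (path : List Int) (n : Nat) (hn : n < path.length) :
    left_path_alt path (n : Int) = (path.take (n + 1)).reverse ++ (path.drop (n + 1)).reverse := by
  have hget : PySem.List.pyGet? path ((n : Nat) : Int) = some (path[n]'hn) := by
    rw [PySem.List.pyGet?_natCast]
    simp [List.getElem?_eq_getElem hn]
  have hcut : ((n : Nat) : Int) + 1 = ((n + 1 : Nat) : Int) := by push_cast; ring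
  unfold left_path_alt
  rw [hget]
  rw [hcut, PySem.List.slice_to_natCast, PySem.List.slice_from_natCast]
  have htake : path.take (n + 1) = path.take n ++ [path[n]'hn] := by
    rw [List.take_add_one, List.getElem?_eq_getElem hn]
    simp
  rw [htake, List.reverse_append]
  simp

-- ===== VERDICT (by name: the statement is the Claim_ definition above) =====
theorem left_path_spec : Claim_equal_left_path := by
  intro path idx _ hpre
  obtain ⟨h0, hlt⟩ := hpre
  obtain ⟨n, rfl⟩ : ∃ n : Nat, idx = (n : Int) := ⟨idx.toNat, (Int.toNat_of_nonneg h0).symm⟩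
  have hn : n < path.length := by exact_mod_cast hlt
  show left_path path (n : Int) = left_path_alt path (n : Int)
  rw [left_path_eq_closed path n hn, left_path_alt_eq_closed path n hn]
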